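-- pv_equiv track=rewrite | github.com/Ramesh-Arvind/ARTV-RED-TEAM | agents.py | _identify_escalation_pattern
-- ===== SOURCE A (Python) =====
-- from typing import List, Dict, Tuple, Any
-- from typing import List, Dict, Tuple, Any
--
-- def _identify_escalation_pattern(conversation: List) -> str:
--     """Identify the escalation pattern used"""
--
--     trust_levels = [c["trust_level"] for c in conversation]
--
--     if trust_levels == sorted(trust_levels):
--         return "linear_escalation"
--     elif trust_levels[-1] > trust_levels[0]:
--         return "progressive_with_setbacks"
--     else:
--         return "no_escalation"
-- ===== SOURCE B (Python) =====
-- def _identify_escalation_pattern(conversation):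
--     """Identify the escalation pattern used (single pass, no sort)."""
--     first = None
--     prev = None
--     monotone = True
--     for c in conversation:
--         t = c["trust_level"]
--         if first is None:
--             first = t
--         elif t < prev:
--             monotone = False
--         prev = t
--     if monotone:
--         return "linear_escalation"
--     if prev > first:
--         return "progressive_with_setbacks"
--     return "no_escalation"
-- ===== Notes on version B (the rewrite author's own statement) =====
-- stated objective: faster
-- what changed: Replaces the build-list-then-sort-and-compare test (plus endpoint indexing) with one linear scan that tracks first, previous and a monotonicity flag.
import Mathlib
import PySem

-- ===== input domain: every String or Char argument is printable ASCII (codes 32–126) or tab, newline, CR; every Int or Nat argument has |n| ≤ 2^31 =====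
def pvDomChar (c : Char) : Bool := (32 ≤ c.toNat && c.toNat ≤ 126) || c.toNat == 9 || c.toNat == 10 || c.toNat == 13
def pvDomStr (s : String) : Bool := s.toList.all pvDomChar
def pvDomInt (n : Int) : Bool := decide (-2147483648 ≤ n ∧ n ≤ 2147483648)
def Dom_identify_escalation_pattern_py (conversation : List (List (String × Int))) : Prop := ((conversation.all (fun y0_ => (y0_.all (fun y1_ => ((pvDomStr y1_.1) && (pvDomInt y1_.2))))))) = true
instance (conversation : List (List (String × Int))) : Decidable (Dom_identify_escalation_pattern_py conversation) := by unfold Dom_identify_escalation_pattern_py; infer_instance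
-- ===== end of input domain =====

-- B replaces A's build-list / sort-and-compare test by one linear scan tracking first, previous and a
-- monotonicity flag (O(n) instead of O(n log n)); return value equivalence is proved below.

-- ===== PORT A =====
-- dict lookup c["trust_level"]: first match in the association list; Pre_ guarantees the key is present
def identify_escalation_pattern_py (conversation : List (List (String × Int))) : String :=
  let trust_levels := conversation.map (fun c => (List.lookup "trust_level" c).getD 0)
  if trust_levels = PySem.List.sorted trust_levels (fun x => x) false then "linear_escalation"
  else if PySem.List.pyGetD trust_levels (-1) 0 > PySem.List.pyGetD trust_levels 0 0 then
    "progressive_with_setbacks"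
  else "no_escalation"

-- ===== PORT B =====
-- loop state: (first, prev, monotone)
def bStep (s : Option Int × Option Int × Bool) (t : Int) : Option Int × Option Int × Bool :=
  match s with
  | (none, _, m) => (some t, some t, m)
  | (some f, p, m) => (some f, some t, if t < p.getD 0 then false else m)

def identify_escalation_pattern_py_alt (conversation : List (List (String × Int))) : String :=
  let st := conversation.foldl (fun s c => bStep s ((List.lookup "trust_level" c).getD 0))
              (none, none, true)
  if st.2.2 then "linear_escalation"
  else if st.1.getD 0 < st.2.1.getD 0 then "progressive_with_setbacks"
  else "no_escalation"

-- ===== PRECONDITION & SPEC =====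
-- Pre_ excludes only conversations where some message dict lacks the "trust_level" key, on which A raises KeyError.
def Pre_identify_escalation_pattern_py (conversation : List (List (String × Int))) : Prop :=
  (conversation.all (fun c => (List.lookup "trust_level" c).isSome)) = true
instance (conversation : List (List (String × Int))) : Decidable (Pre_identify_escalation_pattern_py conversation) := by
  unfold Pre_identify_escalation_pattern_py; infer_instance

def pvWitness_identify_escalation_pattern_py : (List (List (String × Int))) :=
  [[("trust_level", 1)], [("trust_level", 3)], [("trust_level", 2)]]

def Spec_identify_escalation_pattern_py (conversation : List (List (String × Int))) (out : String) : Prop := out = identify_escalation_pattern_py_alt conversation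
instance (conversation : List (List (String × Int))) (out : String) : Decidable (Spec_identify_escalation_pattern_py conversation out) := by unfold Spec_identify_escalation_pattern_py; infer_instance

-- ===== CLAIM (what is proved, stated in full; the proofs are below) =====
def Claim_equal_identify_escalation_pattern_py : Prop := ∀ (conversation : List (List (String × Int))), Dom_identify_escalation_pattern_py conversation → Pre_identify_escalation_pattern_py conversation → Spec_identify_escalation_pattern_py conversation (identify_escalation_pattern_py conversation)

-- ===== LEMMAS AND PROOFS =====

-- characterisation of B's loop once the first element has been seen
lemma bFold_some (tl : List Int) : ∀ (f p : Int) (m : Bool),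
    tl.foldl bStep (some f, some p, m)
      = (some f, some (tl.getLastD p), m && decide (List.IsChain (· ≤ ·) (p :: tl))) := by
  induction tl with
  | nil => intro f p m; simp [List.foldl]
  | cons t rest ih =>
    intro f p m
    simp only [List.foldl, bStep, List.getLastD_cons]
    rw [ih]
    by_cases h : t < p
    · simp [List.isChain_cons_cons, h, not_le.mpr h]
    · simp [List.isChain_cons_cons, h, not_lt.mp h]

-- A's sorted-equality test is exactly chain-monotonicity
lemma sorted_self_iff_chain (tl : List Int) :
    tl = PySem.List.sorted tl (fun x => x) false ↔ List.IsChain (· ≤ ·) tl := by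
  rw [List.isChain_iff_pairwise]
  constructor
  · intro h
    have := PySem.List.sorted_pairwise tl (fun x => x)
    rw [← h] at this
    simpa using this
  · intro h
    exact (PySem.List.sorted_eq_self_of_pairwise _ _ (by simpa using h)).symm

lemma getLast_cons_eq_getLastD (t : Int) (rest : List Int) :
    (t :: rest).getLast (by simp) = rest.getLastD t := by
  cases rest with
  | nil => rfl
  | cons a as => simp [List.getLast_cons, List.getLastD_eq_getLast?, List.getLast?_eq_some_getLast]

-- both programs as a function of the extracted trust-level list
lemma core_eq (tl : List Int) :
    (if tl = PySem.List.sorted tl (fun x => x) false then "linear_escalation"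
     else if PySem.List.pyGetD tl (-1) 0 > PySem.List.pyGetD tl 0 0 then "progressive_with_setbacks"
     else "no_escalation")
    = (let st := tl.foldl bStep (none, none, true)
       if st.2.2 then "linear_escalation"
       else if st.1.getD 0 < st.2.1.getD 0 then "progressive_with_setbacks"
       else "no_escalation") := by
  cases tl with
  | nil => simp [List.foldl, PySem.List.sorted]
  | cons t rest =>
    have hfold : (t :: rest).foldl bStep (none, none, true)
        = (some t, some (rest.getLastD t), decide (List.IsChain (· ≤ ·) (t :: rest))) := by
      simp [List.foldl, bStep, bFold_some]
    rw [hfold]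
    by_cases h : List.IsChain (· ≤ ·) (t :: rest)
    · rw [if_pos ((sorted_self_iff_chain _).mpr h)]
      simp [h]
    · have hne : (t :: rest : List Int) ≠ [] := by simp
      rw [if_neg (fun hc => h ((sorted_self_iff_chain _).mp hc))]
      simp only [h, decide_false, Bool.false_eq_true, if_false, Option.getD_some]
      rw [PySem.List.pyGetD_neg_one _ _ hne, PySem.List.pyGetD_zero_cons,
        getLast_cons_eq_getLastD]
      rfl

-- ===== VERDICT (by name: the statement is the Claim_ definition above) =====
theorem identify_escalation_pattern_py_spec : Claim_equal_identify_escalation_pattern_py := by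
  intro conversation _ _
  unfold Spec_identify_escalation_pattern_py identify_escalation_pattern_py
    identify_escalation_pattern_py_alt
  have h := core_eq (conversation.map (fun c => (List.lookup "trust_level" c).getD 0))
  rw [List.foldl_map] at h
  exact h
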